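-- pv_equiv track=rewrite | github.com/Nicholas1006/dokkan-backend | dokkanfunctions.py | binaryCombinations
-- ===== SOURCE A (Python) =====
-- from itertools import combinations
--
-- def binaryCombinations(sizeOfList, numberOfTrue):
--     """
--     Generates all binary combinations of a given size with a specified number of True values.
--
--     Args:
--         sizeOfList (int): The total number of elements in each binary list.
--         numberOfTrue (int): The number of True values in each combination.
--
--     Returns:
--         List[List[bool]]: A list of binary combinations (as lists of bools).
--     """
--     if numberOfTrue > sizeOfList or numberOfTrue < 0:
--         return []
--
--     result = []
--     indices = range(sizeOfList)
--
--     for true_indices in combinations(indices, numberOfTrue):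
--         combo = [False] * sizeOfList
--         for i in true_indices:
--             combo[i] = True
--         result.append(combo)
--
--     return result
-- ===== SOURCE B (Python) =====
-- def binaryCombinations(sizeOfList, numberOfTrue):
--     """
--     Generates all binary combinations of a given size with a specified number of True values.
--     Recursive backtracking over positions (True branch first), same lexicographic order as A.
--     """
--     if numberOfTrue > sizeOfList or numberOfTrue < 0:
--         return []
--
--     def place(remaining, trues):
--         if remaining == 0:
--             return [[]] if trues == 0 else []
--         out = []
--         if trues > 0:
--             for suffix in place(remaining - 1, trues - 1):
--                 out.append([True] + suffix)
--         if trues <= remaining - 1: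
--             for suffix in place(remaining - 1, trues):
--                 out.append([False] + suffix)
--         return out
--
--     return place(sizeOfList, numberOfTrue)
-- ===== Notes on version B (the rewrite author's own statement) =====
-- stated objective: alternative
-- what changed: Replaces the itertools.combinations-over-indices pass (materialise each index tuple, then scatter Trues into a fresh [False]*n list) with a direct recursive backtracking generator over positions that builds each bool list once, True branch first to keep the same lexicographic order.
import Mathlib
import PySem

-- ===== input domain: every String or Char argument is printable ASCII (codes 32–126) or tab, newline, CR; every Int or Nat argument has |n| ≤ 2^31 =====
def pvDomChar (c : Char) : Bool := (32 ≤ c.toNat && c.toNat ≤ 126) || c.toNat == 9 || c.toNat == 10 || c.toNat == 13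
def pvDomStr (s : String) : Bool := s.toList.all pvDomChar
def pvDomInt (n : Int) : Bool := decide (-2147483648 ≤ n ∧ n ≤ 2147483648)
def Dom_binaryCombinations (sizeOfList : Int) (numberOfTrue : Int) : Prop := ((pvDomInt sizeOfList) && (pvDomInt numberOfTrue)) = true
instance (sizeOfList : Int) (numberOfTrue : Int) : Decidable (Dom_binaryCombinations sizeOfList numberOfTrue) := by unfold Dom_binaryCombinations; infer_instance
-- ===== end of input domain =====

-- B replaces the combinations-tuple-then-scatter construction with recursive
-- backtracking over positions (True branch first); same order, same cost (objective: alternative).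

-- ===== PORT A =====
-- itertools.combinations(xs, k) in lexicographic order (Python's documented output order)
def pvCombs {α : Type} : List α → Nat → List (List α)
  | _, 0 => [[]]
  | [], _ + 1 => []
  | x :: xs, k + 1 => ((pvCombs xs k).map (fun t => x :: t)) ++ pvCombs xs (k + 1)

def binaryCombinations (sizeOfList : Int) (numberOfTrue : Int) : List (List Bool) :=
  if numberOfTrue > sizeOfList ∨ numberOfTrue < 0 then []
  else
    let indices := PySem.List.pyRange 0 sizeOfList 1
    -- for true_indices in combinations(indices, numberOfTrue): combo = [False]*n; combo[i] = True; result.append(combo)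
    (pvCombs indices numberOfTrue.toNat).map (fun t =>
      t.foldl (fun combo i => PySem.List.pySetD combo i true)
        (List.replicate sizeOfList.toNat false))

-- ===== PORT B =====
-- place remaining trues: True branch first, False branch only when it can still fit the trues
def pvPlace : Nat → Nat → List (List Bool)
  | 0, trues => if trues = 0 then [[]] else []
  | remaining + 1, trues =>
      (if 0 < trues then (pvPlace remaining (trues - 1)).map (fun s => true :: s) else []) ++
      (if trues ≤ remaining then (pvPlace remaining trues).map (fun s => false :: s) else [])

def binaryCombinations_alt (sizeOfList : Int) (numberOfTrue : Int) : List (List Bool) :=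
  if numberOfTrue > sizeOfList ∨ numberOfTrue < 0 then []
  else pvPlace sizeOfList.toNat numberOfTrue.toNat

-- ===== PRECONDITION & SPEC =====
def Spec_binaryCombinations (sizeOfList : Int) (numberOfTrue : Int) (out : List (List Bool)) : Prop := out = binaryCombinations_alt sizeOfList numberOfTrue
instance (sizeOfList : Int) (numberOfTrue : Int) (out : List (List Bool)) : Decidable (Spec_binaryCombinations sizeOfList numberOfTrue out) := by unfold Spec_binaryCombinations; infer_instance

-- ===== CLAIM (what is proved, stated in full; the proofs are below) =====
def Claim_equal_binaryCombinations : Prop := ∀ (sizeOfList : Int) (numberOfTrue : Int), Dom_binaryCombinations sizeOfList numberOfTrue → Spec_binaryCombinations sizeOfList numberOfTrue (binaryCombinations sizeOfList numberOfTrue)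

-- ===== LEMMAS AND PROOFS =====

-- proof-side indicator: the bool list with True exactly at the indices of t
def pvIndic (n : Nat) (t : List Nat) : List Bool :=
  (List.range n).map (fun i => decide (i ∈ t))

theorem pvCombs_map {α β : Type} (f : α → β) :
    ∀ (xs : List α) (k : Nat), pvCombs (xs.map f) k = (pvCombs xs k).map (List.map f) := by
  intro xs
  induction xs with
  | nil => intro k; cases k <;> simp [pvCombs]
  | cons x xs ih =>
      intro k
      cases k with
      | zero => simp [pvCombs]
      | succ m => simp [pvCombs, ih, Function.comp_def]

theorem pvCombs_eq_nil {α : Type} :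
    ∀ (xs : List α) (k : Nat), xs.length < k → pvCombs xs k = [] := by
  intro xs
  induction xs with
  | nil => intro k h; cases k with
      | zero => omega
      | succ m => rfl
  | cons x xs ih =>
      intro k h
      cases k with
      | zero => omega
      | succ m =>
          simp only [pvCombs]
          rw [ih m (by simp at h; omega), ih (m+1) (by simp at h; omega)]
          simp

theorem pvCombs_mem {α : Type} :
    ∀ (xs : List α) (k : Nat) (t : List α), t ∈ pvCombs xs k → ∀ a ∈ t, a ∈ xs := by
  intro xs
  induction xs with
  | nil => intro k t ht; cases k with
      | zero => simp [pvCombs] at ht; simp [ht]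
      | succ m => simp [pvCombs] at ht
  | cons x xs ih =>
      intro k t ht
      cases k with
      | zero => simp [pvCombs] at ht; simp [ht]
      | succ m =>
          simp only [pvCombs, List.mem_append, List.mem_map] at ht
          rcases ht with ⟨s, hs, rfl⟩ | ht
          · intro a ha
            rcases List.mem_cons.mp ha with rfl | ha
            · exact List.mem_cons_self
            · exact List.mem_cons_of_mem _ (ih m s hs a ha)
          · intro a ha
            exact List.mem_cons_of_mem _ (ih (m+1) t ht a ha)

-- the scatter loop of port A, on the Nat side
theorem pvMark_getElem :
    ∀ (t : List Nat) (bs : List Bool), (∀ i ∈ t, i < bs.length) →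
      ∀ (j : Nat) (hj : j < (t.foldl (fun combo i => combo.set i true) bs).length)
        (hj' : j < bs.length),
        (t.foldl (fun combo i => combo.set i true) bs)[j] = ((bs[j]'hj') || decide (j ∈ t)) := by
  intro t
  induction t with
  | nil => intro bs _ j hj hj'; simp
  | cons a t ih =>
      intro bs hbound j hj hj'
      simp only [List.foldl_cons]
      have hlen : ∀ i ∈ t, i < (bs.set a true).length := by
        intro i hi; simpa using hbound i (List.mem_cons_of_mem _ hi)
      have hj2 : j < (bs.set a true).length := by simpa using hj'
      rw [ih (bs.set a true) hlen j (by simpa [List.foldl_cons] using hj) hj2]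
      rw [List.getElem_set]
      by_cases hja : a = j
      · subst hja; simp
      · simp [hja, Ne.symm hja]

theorem pvMark_length :
    ∀ (t : List Nat) (bs : List Bool),
      (t.foldl (fun combo i => combo.set i true) bs).length = bs.length := by
  intro t
  induction t with
  | nil => intro bs; rfl
  | cons a t ih => intro bs; simp [List.foldl_cons, ih]

theorem pvMark_replicate (n : Nat) (t : List Nat) (h : ∀ i ∈ t, i < n) :
    t.foldl (fun combo i => combo.set i true) (List.replicate n false) = pvIndic n t := by
  apply List.ext_getElem
  · simp [pvMark_length, pvIndic]
  · intro j hj1 hj2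
    have hjn : j < n := by simpa [pvIndic] using hj2
    rw [pvMark_getElem t (List.replicate n false) (by simpa using h) j hj1 (by simpa using hjn)]
    simp [pvIndic]

theorem pvIndic_cons_zero (n : Nat) (s : List Nat) :
    pvIndic (n + 1) (0 :: s.map Nat.succ) = true :: pvIndic n s := by
  simp only [pvIndic, List.range_succ_eq_map, List.map_cons, List.map_map]
  congr 1
  apply List.map_congr_left
  intro i _
  simp

theorem pvIndic_shift (n : Nat) (s : List Nat) :
    pvIndic (n + 1) (s.map Nat.succ) = false :: pvIndic n s := by
  simp only [pvIndic, List.range_succ_eq_map, List.map_cons, List.map_map]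
  congr 1
  · simp
  · apply List.map_congr_left
    intro i _
    simp

theorem pvMain : ∀ (n k : Nat),
    (pvCombs (List.range n) k).map (pvIndic n) = pvPlace n k := by
  intro n
  induction n with
  | zero =>
      intro k
      cases k with
      | zero => simp [pvCombs, pvPlace, pvIndic]
      | succ m => simp [pvCombs, pvPlace]
  | succ n ih =>
      intro k
      cases k with
      | zero =>
          have h0 : pvPlace n 0 = [pvIndic n []] := by
            rw [← ih 0]; simp [pvCombs]
          simp only [pvCombs, pvPlace, List.map_cons, List.map_nil]
          rw [h0]
          simp [pvIndic, List.range_succ_eq_map, List.map_map]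
      | succ m =>
          rw [List.range_succ_eq_map]
          simp only [pvCombs]
          rw [pvCombs_map Nat.succ (List.range n) m,
              pvCombs_map Nat.succ (List.range n) (m+1)]
          simp only [List.map_append, List.map_map, Function.comp_def]
          have e1 : (pvCombs (List.range n) m).map
              (fun t => pvIndic (n+1) ((0:Nat) :: List.map Nat.succ t))
              = (pvPlace n m).map (fun s => true :: s) := by
            rw [← ih m, List.map_map]
            apply List.map_congr_left; intro s _
            simp [pvIndic_cons_zero]
          have e2 : (pvCombs (List.range n) (m+1)).map
              (fun t => pvIndic (n+1) (List.map Nat.succ t))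
              = (pvPlace n (m+1)).map (fun s => false :: s) := by
            rw [← ih (m+1), List.map_map]
            apply List.map_congr_left; intro s _
            simp [pvIndic_shift]
          rw [e1, e2]
          simp only [pvPlace, Nat.succ_sub_one, Nat.zero_lt_succ, if_true]
          by_cases hmn : m + 1 ≤ n
          · rw [if_pos hmn]
          · rw [if_neg hmn]
            have : pvCombs (List.range n) (m+1) = [] :=
              pvCombs_eq_nil (List.range n) (m+1) (by simp; omega)
            rw [← ih (m+1), this]
            simp

theorem pvMain_int (n k : Nat) :
    (pvCombs (PySem.List.pyRange 0 (n : Int) 1) k).map (fun t =>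
      t.foldl (fun combo i => PySem.List.pySetD combo i true) (List.replicate n false))
    = pvPlace n k := by
  have hr : PySem.List.pyRange 0 (n : Int) 1 = (List.range n).map (fun j : Nat => (j : Int)) := by
    rw [PySem.List.pyRange_one]
    simp
  rw [hr, pvCombs_map]
  rw [List.map_map]
  rw [← pvMain n k]
  apply List.map_congr_left
  intro t ht
  have hb : ∀ i ∈ t, i < n := by
    intro i hi
    have := pvCombs_mem (List.range n) k t ht i hi
    simpa using this
  simp only [Function.comp]
  rw [List.foldl_map]
  simp only [PySem.List.pySetD_natCast]
  exact pvMark_replicate n t hb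

-- ===== VERDICT (by name: the statement is the Claim_ definition above) =====
theorem binaryCombinations_spec : Claim_equal_binaryCombinations := by
  intro n k _
  unfold Spec_binaryCombinations binaryCombinations binaryCombinations_alt
  by_cases h : k > n ∨ k < 0
  · simp [h]
  · rw [if_neg h, if_neg h]
    rw [not_or, not_lt, not_lt] at h
    have hn : 0 ≤ n := le_trans h.2 h.1
    have hncast : ((n.toNat : Nat) : Int) = n := Int.toNat_of_nonneg hn
    calc (pvCombs (PySem.List.pyRange 0 n 1) k.toNat).map (fun t =>
          t.foldl (fun combo i => PySem.List.pySetD combo i true) (List.replicate n.toNat false))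
        = (pvCombs (PySem.List.pyRange 0 ((n.toNat : Nat) : Int) 1) k.toNat).map (fun t =>
          t.foldl (fun combo i => PySem.List.pySetD combo i true) (List.replicate n.toNat false)) := by rw [hncast]
      _ = pvPlace n.toNat k.toNat := pvMain_int n.toNat k.toNat
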